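-- pv_equiv track=rewrite | github.com/pixianer163-design/kvbfs | cfs/daemon.py | needs_response
-- ===== SOURCE A (Python) =====
-- def needs_response(content: str) -> bool:
--     """Return True if the file has an unanswered User: message."""
--     lines = [line for line in content.splitlines() if line.strip()]
--     if not lines:
--         return False
--     last_user_idx = -1
--     last_assistant_idx = -1
--     for i, line in enumerate(lines):
--         if line.startswith("User:"):
--             last_user_idx = i
--         elif line.startswith("Assistant:"):
--             last_assistant_idx = i
--     return last_user_idx > last_assistant_idx
-- ===== SOURCE B (Python) =====
-- def needs_response(content: str) -> bool:
--     """Return True if the file has an unanswered User: message."""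
--     for line in reversed(content.splitlines()):
--         if not line.strip():
--             continue
--         if line.startswith("User:"):
--             return True
--         if line.startswith("Assistant:"):
--             return False
--     return False
-- ===== Notes on version B (the rewrite author's own statement) =====
-- stated objective: simpler
-- what changed: Replaces the forward pass that tracks two running last-seen indices (plus a pre-built filtered list) with a single reverse scan that short-circuits at the last User:/Assistant: line.
import Mathlib
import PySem

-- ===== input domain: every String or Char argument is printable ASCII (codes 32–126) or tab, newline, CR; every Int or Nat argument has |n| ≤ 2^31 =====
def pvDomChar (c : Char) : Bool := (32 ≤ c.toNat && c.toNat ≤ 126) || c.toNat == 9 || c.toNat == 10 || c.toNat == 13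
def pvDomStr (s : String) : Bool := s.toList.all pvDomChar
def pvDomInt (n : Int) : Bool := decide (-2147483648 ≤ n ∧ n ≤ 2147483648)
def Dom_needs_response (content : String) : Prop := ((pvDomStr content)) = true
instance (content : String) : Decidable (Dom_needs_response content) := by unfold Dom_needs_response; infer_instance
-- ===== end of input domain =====

-- B replaces A's forward pass with two running last-seen indices by a reverse scan with early exit (simpler; same cost).

-- ===== PORT A =====
-- the loop body of A's for-loop over enumerate(lines)
def nrStep (s : Int × Int) (p : Int × String) : Int × Int :=
  if PySem.Str.startswith p.2 "User:" then (p.1, s.2)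
  else if PySem.Str.startswith p.2 "Assistant:" then (s.1, p.1)
  else s

def needs_response (content : String) : Bool :=
  let lines := (PySem.Str.splitlines content).filter (fun l => PySem.Str.strip l != "")
  if lines = [] then false
  else
    let st := (PySem.List.enumerate lines).foldl nrStep (-1, -1)
    decide (st.1 > st.2)

-- ===== PORT B =====
-- B's for-loop over reversed(content.splitlines()): skip blank lines, decide at the first prefixed line
def nrGo : List String → Bool
  | [] => false
  | l :: rest =>
    if PySem.Str.strip l == "" then nrGo rest
    else if PySem.Str.startswith l "User:" then true
    else if PySem.Str.startswith l "Assistant:" then false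
    else nrGo rest

def needs_response_alt (content : String) : Bool :=
  nrGo (PySem.Str.splitlines content).reverse

-- ===== PRECONDITION & SPEC =====
def Spec_needs_response (content : String) (out : Bool) : Prop := out = needs_response_alt content
instance (content : String) (out : Bool) : Decidable (Spec_needs_response content out) := by unfold Spec_needs_response; infer_instance

-- ===== CLAIM (what is proved, stated in full; the proofs are below) =====
def Claim_equal_needs_response : Prop := ∀ (content : String), Dom_needs_response content → Spec_needs_response content (needs_response content)

-- ===== LEMMAS AND PROOFS =====

-- scanning with the blank-skip equals scanning the blank-filtered list
theorem nrGo_filter (xs : List String) :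
    nrGo xs = nrGo (xs.filter (fun l => PySem.Str.strip l != "")) := by
  induction xs with
  | nil => rfl
  | cons l rest ih =>
    by_cases h : PySem.Str.strip l == ""
    · simp only [List.filter_cons]
      rw [show ((PySem.Str.strip l != "") = false) by simp_all]
      simp [nrGo, h, ih]
    · simp only [List.filter_cons]
      rw [show ((PySem.Str.strip l != "") = true) by simp_all]
      simp [nrGo, h, ih]

-- both indices stay below the next enumeration index
theorem nrStep_bound (lst : List String) : ∀ (s u a : Int), u < s → a < s →
    ((PySem.List.enumerate lst s).foldl nrStep (u, a)).1 < s + lst.length ∧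
    ((PySem.List.enumerate lst s).foldl nrStep (u, a)).2 < s + lst.length := by
  induction lst with
  | nil => intro s u a hu ha; simp [PySem.List.enumerate_nil]; omega
  | cons x xs ih =>
    intro s u a hu ha
    rw [PySem.List.enumerate_cons]
    simp only [List.foldl_cons]
    have h1 : (nrStep (u, a) (s, x)).1 < s + 1 := by
      unfold nrStep; split_ifs <;> simp <;> omega
    have h2 : (nrStep (u, a) (s, x)).2 < s + 1 := by
      unfold nrStep; split_ifs <;> simp <;> omega
    have := ih (s + 1) _ _ h1 h2
    rcases this with ⟨H1, H2⟩
    constructor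
    · calc _ < s + 1 + (xs.length : Int) := H1
        _ ≤ s + (x :: xs).length := by simp; omega
    · calc _ < s + 1 + (xs.length : Int) := H2
        _ ≤ s + (x :: xs).length := by simp; omega

-- the core correspondence, on a list without blank lines
theorem nr_key (lst : List String) (h : ∀ l ∈ lst, (PySem.Str.strip l == "") = false) :
    decide (((PySem.List.enumerate lst).foldl nrStep (-1, -1)).1 >
            ((PySem.List.enumerate lst).foldl nrStep (-1, -1)).2) = nrGo lst.reverse := by
  induction lst using List.reverseRecOn with
  | nil => simp [PySem.List.enumerate, nrGo]
  | append_singleton ls x ih =>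
    have hx : (PySem.Str.strip x == "") = false := h x (by simp)
    have hls : ∀ l ∈ ls, (PySem.Str.strip l == "") = false := fun l hl => h l (by simp [hl])
    have hb := nrStep_bound ls 0 (-1) (-1) (by norm_num) (by norm_num)
    rw [show PySem.List.enumerate (ls ++ [x]) 0 =
          PySem.List.enumerate ls 0 ++ [((ls.length : Int), x)] by
        rw [PySem.List.enumerate_append]; simp [PySem.List.enumerate_cons, PySem.List.enumerate_nil]]
    rw [List.foldl_append, List.reverse_append,
        show ([x].reverse ++ ls.reverse) = x :: ls.reverse by simp]
    simp only [List.foldl_cons, List.foldl_nil]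
    set st := (PySem.List.enumerate ls 0).foldl nrStep (-1, -1) with hst
    obtain ⟨H1, H2⟩ := hb
    cases hU : PySem.Str.startswith x "User:" with
    | true =>
      have hs : nrStep st ((ls.length : Int), x) = ((ls.length : Int), st.2) := by
        simp only [nrStep, hU]; simp
      have hg : nrGo (x :: ls.reverse) = true := by
        simp only [nrGo, hx, hU]; simp
      simp only [hs, hg, gt_iff_lt, decide_eq_true_eq]
      omega
    | false =>
      cases hA : PySem.Str.startswith x "Assistant:" with
      | true =>
        have hs : nrStep st ((ls.length : Int), x) = (st.1, (ls.length : Int)) := by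
          simp only [nrStep, hU, hA]; simp
        have hg : nrGo (x :: ls.reverse) = false := by
          simp only [nrGo, hx, hU, hA]; simp
        simp only [hs, hg, gt_iff_lt, decide_eq_false_iff_not, not_lt]
        omega
      | false =>
        have hs : nrStep st ((ls.length : Int), x) = st := by
          simp only [nrStep, hU, hA]; simp
        have hg : nrGo (x :: ls.reverse) = nrGo ls.reverse := by
          simp only [nrGo, hx, hU, hA]; simp
        simp only [hs, hg]
        exact ih hls

-- ===== VERDICT (by name: the statement is the Claim_ definition above) =====
theorem needs_response_spec : Claim_equal_needs_response := by
  intro content _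
  unfold Spec_needs_response needs_response needs_response_alt
  rw [nrGo_filter, List.filter_reverse]
  show (if (PySem.Str.splitlines content).filter (fun l => PySem.Str.strip l != "") = []
        then false
        else decide
          (((PySem.List.enumerate ((PySem.Str.splitlines content).filter
              (fun l => PySem.Str.strip l != ""))).foldl nrStep (-1, -1)).1 >
           ((PySem.List.enumerate ((PySem.Str.splitlines content).filter
              (fun l => PySem.Str.strip l != ""))).foldl nrStep (-1, -1)).2)) =
      nrGo ((PySem.Str.splitlines content).filter (fun l => PySem.Str.strip l != "")).reverse
  set lines := (PySem.Str.splitlines content).filter (fun l => PySem.Str.strip l != "") with hl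
  by_cases he : lines = []
  · simp [he, nrGo]
  · have hnb : ∀ l ∈ lines, (PySem.Str.strip l == "") = false := by
      intro l hml
      rw [hl] at hml
      have := List.of_mem_filter hml
      simpa using this
    rw [if_neg he]
    exact nr_key lines hnb
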